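-- pv_equiv track=rewrite | github.com/drillan/note-mcp | src/note_mcp/browser/image_helpers.py | _get_image_extension
-- ===== SOURCE A (Python) =====
-- _SUPPORTED_EXTENSIONS = {".jpg", ".jpeg", ".png", ".gif", ".webp"}
--
-- def _get_image_extension(url: str, content_type: str) -> str:
--     """Get image file extension from URL or content-type.
--
--     Args:
--         url: URL of the image.
--         content_type: Content-Type header value.
--
--     Returns:
--         File extension including dot (e.g., ".jpg").
--     """
--     # Try to get from URL path
--     url_path = url.split("?")[0]  # Remove query string
--     for ext in _SUPPORTED_EXTENSIONS:
--         if url_path.lower().endswith(ext):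
--             return ext
--
--     # Try to get from content-type
--     content_type_map = {
--         "image/jpeg": ".jpg",
--         "image/png": ".png",
--         "image/gif": ".gif",
--         "image/webp": ".webp",
--     }
--     for ct, ext in content_type_map.items():
--         if ct in content_type.lower():
--             return ext
--
--     # Default to .jpg
--     return ".jpg"
-- ===== SOURCE B (Python) =====
-- _SUPPORTED_EXTENSIONS = {".jpg", ".jpeg", ".png", ".gif", ".webp"}
--
-- _CONTENT_TYPE_MAP = (
--     ("image/jpeg", ".jpg"),
--     ("image/png", ".png"),
--     ("image/gif", ".gif"),
--     ("image/webp", ".webp"),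
-- )
--
--
-- def _get_image_extension(url: str, content_type: str) -> str:
--     """Get image file extension from URL or content-type.
--
--     Instead of testing each supported suffix against the URL, extract the
--     candidate extension once with rpartition and look it up; no candidate
--     means a single pass over the content-type table (as a generator).
--     """
--     path = url.split("?")[0]
--     _head, sep, tail = path.rpartition(".")
--     if sep:
--         ext = "." + tail.lower()
--         if ext in _SUPPORTED_EXTENSIONS:
--             return ext
--     ct = content_type.lower()
--     return next((ext for sub, ext in _CONTENT_TYPE_MAP if sub in ct), ".jpg")
-- ===== Notes on version B (the rewrite author's own statement) =====
-- stated objective: alternative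
-- what changed: B extracts the candidate extension from the URL once with rpartition('.') and looks it up in the supported set, instead of A's loop of five endswith tests over the whole lowercased path; the content-type fallback becomes a single next() over the ordered table.
import Mathlib
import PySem

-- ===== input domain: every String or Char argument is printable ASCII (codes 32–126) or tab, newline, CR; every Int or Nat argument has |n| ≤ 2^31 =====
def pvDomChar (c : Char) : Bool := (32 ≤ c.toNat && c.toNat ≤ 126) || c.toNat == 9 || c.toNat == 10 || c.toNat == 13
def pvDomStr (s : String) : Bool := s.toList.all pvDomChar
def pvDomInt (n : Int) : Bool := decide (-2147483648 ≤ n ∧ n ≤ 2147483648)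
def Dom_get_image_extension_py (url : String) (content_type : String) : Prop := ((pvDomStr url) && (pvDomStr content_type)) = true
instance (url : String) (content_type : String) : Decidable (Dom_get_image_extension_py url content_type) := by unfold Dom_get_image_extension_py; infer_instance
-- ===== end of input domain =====

-- B extracts the URL's candidate extension once with rpartition('.') and looks it up, instead of A's five endswith tests (alternative decomposition, same cost class).


-- ===== PORT A =====
-- A iterates over the set _SUPPORTED_EXTENSIONS; no extension is a suffix of
-- another, so at most one endswith test can succeed and the set's hash order
-- cannot affect the result: we iterate it in a fixed order.
-- 'for ext in _SUPPORTED_EXTENSIONS: if url_path.lower().endswith(ext): return ext'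
def extLoopA : List String → List Char → Option String
  | [], _ => none
  | ext :: rest, lp =>
      if PySem.Chars.endswith lp ext.toList then some ext else extLoopA rest lp

-- 'for ct, ext in content_type_map.items(): if ct in content_type.lower(): return ext'
def ctLoopA : List (String × String) → List Char → String
  | [], _ => ".jpg"
  | (ct, ext) :: rest, lct =>
      if PySem.Chars.isIn ct.toList lct then ext else ctLoopA rest lct

def get_image_extension_py (url : String) (content_type : String) : String :=
  -- url.split("?")[0]: split with a nonempty separator is some nonempty list,
  -- so the defaults of getD/headD are never used
  let url_path : List Char := ((PySem.Chars.split? url.toList ['?']).getD []).headD []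
  match extLoopA [".jpg", ".jpeg", ".png", ".gif", ".webp"] (PySem.Chars.lower url_path) with
  | some ext => ext
  | none =>
      ctLoopA [("image/jpeg", ".jpg"), ("image/png", ".png"), ("image/gif", ".gif"),
        ("image/webp", ".webp")] (PySem.Chars.lower content_type.toList)

-- ===== PORT B =====
def get_image_extension_py_alt (url : String) (content_type : String) : String :=
  let path : List Char := ((PySem.Chars.split? url.toList ['?']).getD []).headD []
  -- _head, sep, tail = path.rpartition("."): sep is truthy iff '.' ∈ path, and
  -- tail is the run of non-dot characters at the end of path
  let tail : List Char := (path.reverse.takeWhile (· ≠ '.')).reverse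
  let fromUrl : Option (List Char) :=
    if '.' ∈ path then
      let ext : List Char := '.' :: PySem.Chars.lower tail   -- "." + tail.lower()
      if ext = ".jpg".toList ∨ ext = ".jpeg".toList ∨ ext = ".png".toList ∨
          ext = ".gif".toList ∨ ext = ".webp".toList then some ext else none
    else none
  match fromUrl with
  | some ext => String.ofList ext
  | none =>
      -- next((ext for sub, ext in _CONTENT_TYPE_MAP if sub in ct), ".jpg")
      let lct := PySem.Chars.lower content_type.toList
      ((([("image/jpeg", ".jpg"), ("image/png", ".png"), ("image/gif", ".gif"),
          ("image/webp", ".webp")].find? (fun p => PySem.Chars.isIn p.1.toList lct)).map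
        Prod.snd).getD ".jpg")

-- ===== PRECONDITION & SPEC =====
def Spec_get_image_extension_py (url : String) (content_type : String) (out : String) : Prop := out = get_image_extension_py_alt url content_type
instance (url : String) (content_type : String) (out : String) : Decidable (Spec_get_image_extension_py url content_type out) := by unfold Spec_get_image_extension_py; infer_instance

-- ===== CLAIM (what is proved, stated in full; the proofs are below) =====
def Claim_equal_get_image_extension_py : Prop := ∀ (url : String) (content_type : String), Dom_get_image_extension_py url content_type → Spec_get_image_extension_py url content_type (get_image_extension_py url content_type)

-- ===== LEMMAS AND PROOFS =====

-- lowering a character yields '.' only for '.'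
lemma pv_lowerChar_dot (c : Char) : PySem.Chars.lowerChar c = '.' ↔ c = '.' := by
  constructor
  · intro h
    simp only [PySem.Chars.lowerChar, PySem.Chars.isupper] at h
    split_ifs at h with hu
    · exfalso
      simp only [Bool.and_eq_true, decide_eq_true_eq, Char.le_def] at hu
      have h1 : 65 ≤ c.toNat := by
        have := hu.1; exact this
      have h2 : c.toNat ≤ 90 := hu.2
      have hv : (Char.ofNat (c.toNat + 32)).toNat = c.toNat + 32 := by
        rw [Char.ofNat, dif_pos (Or.inl (by omega) : Nat.isValidChar (c.toNat + 32))]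
        rfl
      rw [h] at hv
      simp only [show ('.' : Char).toNat = 46 from rfl] at hv
      omega
    · exact h
  · intro h; subst h; decide

-- prefix characterisation of the last dot-free run: v ++ ['.'] is a prefix of
-- lower r iff r contains a dot and the part of r before the first dot lowers to v
lemma pv_tailExt (r v : List Char) (hv : '.' ∉ v) :
    (v ++ ['.'] <+: PySem.Chars.lower r) ↔
      ('.' ∈ r ∧ PySem.Chars.lower (r.takeWhile (· ≠ '.')) = v) := by
  induction r generalizing v with
  | nil =>
      simp [PySem.Chars.lower]
  | cons c r' IH =>
      have hlc : PySem.Chars.lower (c :: r') = PySem.Chars.lowerChar c :: PySem.Chars.lower r' := rfl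
      cases v with
      | nil =>
          by_cases hc : c = '.'
          · subst hc
            simp [hlc, List.takeWhile, PySem.Chars.lower, List.cons_prefix_cons,
              show PySem.Chars.lowerChar '.' = '.' from rfl]
          · have hld : PySem.Chars.lowerChar c ≠ '.' := fun h => hc ((pv_lowerChar_dot c).mp h)
            simp [hlc, List.takeWhile, hc, List.cons_prefix_cons, PySem.Chars.lower,
              Ne.symm hld, hld]
      | cons a v' =>
          have ha : a ≠ '.' := fun h => hv (by simp [h])
          have hv' : '.' ∉ v' := fun h => hv (by simp [h])
          by_cases hc : c = '.'
          · subst hc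
            simp only [hlc, show PySem.Chars.lowerChar '.' = '.' from rfl, List.cons_append,
              List.cons_prefix_cons, List.takeWhile]
            simp [ha, PySem.Chars.lower]
          · have hld : PySem.Chars.lowerChar c ≠ '.' := fun h => hc ((pv_lowerChar_dot c).mp h)
            simp only [hlc, List.cons_append, List.cons_prefix_cons, List.takeWhile,
              decide_not]
            rw [IH v' hv']
            simp [hc, PySem.Chars.lower, eq_comm]
            tauto

-- endswith on the lowered path, for a dot-free extension body w:
-- lower path ends with '.'::w iff path has a dot and its rpartition tail lowers to w
lemma pv_endswith_ext (s w : List Char) (hw : '.' ∉ w) :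
    PySem.Chars.endswith (PySem.Chars.lower s) ('.' :: w) = true ↔
      ('.' ∈ s ∧ PySem.Chars.lower ((s.reverse.takeWhile (· ≠ '.')).reverse) = w) := by
  rw [PySem.Chars.endswith_iff]
  have h1 : ('.' :: w) <:+ PySem.Chars.lower s ↔
      ('.' :: w).reverse <+: (PySem.Chars.lower s).reverse := by
    constructor
    · intro h; exact List.reverse_prefix.mpr (by simpa using h)
    · intro h; have := List.reverse_prefix.mp h; simpa using this
  rw [h1]
  have h2 : (PySem.Chars.lower s).reverse = PySem.Chars.lower s.reverse := by
    simp [PySem.Chars.lower]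
  have h3 : ('.' :: w).reverse = w.reverse ++ ['.'] := by simp
  rw [h2, h3, pv_tailExt s.reverse w.reverse (by simpa using hw)]
  constructor
  · rintro ⟨hm, he⟩
    refine ⟨by simpa using hm, ?_⟩
    have : PySem.Chars.lower ((s.reverse.takeWhile (· ≠ '.')).reverse) =
        (PySem.Chars.lower (s.reverse.takeWhile (· ≠ '.'))).reverse := by
      simp [PySem.Chars.lower]
    rw [this, he]; simp
  · rintro ⟨hm, he⟩
    refine ⟨by simpa using hm, ?_⟩
    have h4 : PySem.Chars.lower (s.reverse.takeWhile (· ≠ '.')) =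
        (PySem.Chars.lower ((s.reverse.takeWhile (· ≠ '.')).reverse)).reverse := by
      simp [PySem.Chars.lower]
    rw [h4, he]

-- A's content-type loop equals B's find?-based fallback
lemma pv_ct_eq (l : List (String × String)) (lct : List Char) :
    ctLoopA l lct = ((l.find? (fun p => PySem.Chars.isIn p.1.toList lct)).map Prod.snd).getD ".jpg" := by
  induction l with
  | nil => rfl
  | cons p rest IH =>
      obtain ⟨ct, ext⟩ := p
      by_cases h : PySem.Chars.isIn ct.toList lct = true
      · simp [ctLoopA, List.find?, h]
      · simp only [Bool.not_eq_true] at h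
        simp [ctLoopA, List.find?, h, IH]

theorem pv_main (url content_type : String) :
    get_image_extension_py url content_type = get_image_extension_py_alt url content_type := by
  simp only [get_image_extension_py, get_image_extension_py_alt]
  generalize ((PySem.Chars.split? url.toList ['?']).getD []).headD [] = s
  set t := PySem.Chars.lower ((s.reverse.takeWhile (· ≠ '.')).reverse) with ht
  have hjpg := pv_endswith_ext s ['j','p','g'] (by decide)
  have hjpeg := pv_endswith_ext s ['j','p','e','g'] (by decide)
  have hpng := pv_endswith_ext s ['p','n','g'] (by decide)
  have hgif := pv_endswith_ext s ['g','i','f'] (by decide)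
  have hwebp := pv_endswith_ext s ['w','e','b','p'] (by decide)
  rw [← ht] at hjpg hjpeg hpng hgif hwebp
  by_cases hd : '.' ∈ s
  · -- path has a dot; the loop result is determined by t
    have c1 : (".jpg" : String).toList = ['.','j','p','g'] := by decide
    have c2 : (".jpeg" : String).toList = ['.','j','p','e','g'] := by decide
    have c3 : (".png" : String).toList = ['.','p','n','g'] := by decide
    have c4 : (".gif" : String).toList = ['.','g','i','f'] := by decide
    have c5 : (".webp" : String).toList = ['.','w','e','b','p'] := by decide
    have o1 : String.ofList ['.','j','p','g'] = ".jpg" := by decide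
    have o2 : String.ofList ['.','j','p','e','g'] = ".jpeg" := by decide
    have o3 : String.ofList ['.','p','n','g'] = ".png" := by decide
    have o4 : String.ofList ['.','g','i','f'] = ".gif" := by decide
    have o5 : String.ofList ['.','w','e','b','p'] = ".webp" := by decide
    by_cases e1 : t = ['j','p','g']
    · simp [extLoopA, c1, hjpg, hd, e1, o1, o2, o3, o4, o5]
    · by_cases e2 : t = ['j','p','e','g']
      · have n1 : ¬ PySem.Chars.endswith (PySem.Chars.lower s) ['.','j','p','g'] = true := by
          rw [hjpg]; rintro ⟨-, h⟩; rw [e2] at h; cases h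
        simp [extLoopA, c1, c2, n1, hjpeg, hd, e1, e2, o1, o2, o3, o4, o5]
      · by_cases e3 : t = ['p','n','g']
        · have n1 : ¬ PySem.Chars.endswith (PySem.Chars.lower s) ['.','j','p','g'] = true := by
            rw [hjpg]; rintro ⟨-, h⟩; rw [e3] at h; cases h
          have n2 : ¬ PySem.Chars.endswith (PySem.Chars.lower s) ['.','j','p','e','g'] = true := by
            rw [hjpeg]; rintro ⟨-, h⟩; rw [e3] at h; cases h
          simp [extLoopA, c1, c2, c3, n1, n2, hpng, hd, e1, e2, e3, o1, o2, o3, o4, o5]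
        · by_cases e4 : t = ['g','i','f']
          · have n1 : ¬ PySem.Chars.endswith (PySem.Chars.lower s) ['.','j','p','g'] = true := by
              rw [hjpg]; rintro ⟨-, h⟩; rw [e4] at h; cases h
            have n2 : ¬ PySem.Chars.endswith (PySem.Chars.lower s) ['.','j','p','e','g'] = true := by
              rw [hjpeg]; rintro ⟨-, h⟩; rw [e4] at h; cases h
            have n3 : ¬ PySem.Chars.endswith (PySem.Chars.lower s) ['.','p','n','g'] = true := by
              rw [hpng]; rintro ⟨-, h⟩; rw [e4] at h; cases h
            simp [extLoopA, c1, c2, c3, c4, n1, n2, n3, hgif, hd, e1, e2, e3, e4, o1, o2, o3, o4, o5]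
          · by_cases e5 : t = ['w','e','b','p']
            · have n1 : ¬ PySem.Chars.endswith (PySem.Chars.lower s) ['.','j','p','g'] = true := by
                rw [hjpg]; rintro ⟨-, h⟩; rw [e5] at h; cases h
              have n2 : ¬ PySem.Chars.endswith (PySem.Chars.lower s) ['.','j','p','e','g'] = true := by
                rw [hjpeg]; rintro ⟨-, h⟩; rw [e5] at h; cases h
              have n3 : ¬ PySem.Chars.endswith (PySem.Chars.lower s) ['.','p','n','g'] = true := by
                rw [hpng]; rintro ⟨-, h⟩; rw [e5] at h; cases h
              have n4 : ¬ PySem.Chars.endswith (PySem.Chars.lower s) ['.','g','i','f'] = true := by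
                rw [hgif]; rintro ⟨-, h⟩; rw [e5] at h; cases h
              simp [extLoopA, c1, c2, c3, c4, c5, n1, n2, n3, n4, hwebp, hd, e1, e2, e3, e4, e5, o1, o2, o3, o4, o5]
            · -- no supported extension: both fall back to the content-type scan
              have n1 : ¬ PySem.Chars.endswith (PySem.Chars.lower s) ['.','j','p','g'] = true := by
                rw [hjpg]; rintro ⟨-, h⟩; exact e1 h
              have n2 : ¬ PySem.Chars.endswith (PySem.Chars.lower s) ['.','j','p','e','g'] = true := by
                rw [hjpeg]; rintro ⟨-, h⟩; exact e2 h
              have n3 : ¬ PySem.Chars.endswith (PySem.Chars.lower s) ['.','p','n','g'] = true := by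
                rw [hpng]; rintro ⟨-, h⟩; exact e3 h
              have n4 : ¬ PySem.Chars.endswith (PySem.Chars.lower s) ['.','g','i','f'] = true := by
                rw [hgif]; rintro ⟨-, h⟩; exact e4 h
              have n5 : ¬ PySem.Chars.endswith (PySem.Chars.lower s) ['.','w','e','b','p'] = true := by
                rw [hwebp]; rintro ⟨-, h⟩; exact e5 h
              simp [extLoopA, c1, c2, c3, c4, c5, n1, n2, n3, n4, n5, hd, e1, e2, e3, e4, e5,
                pv_ct_eq]
  · -- no dot in the path: no endswith test can succeed, both fall back
    have n1 : ¬ PySem.Chars.endswith (PySem.Chars.lower s) ['.','j','p','g'] = true := by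
      rw [hjpg]; rintro ⟨h, -⟩; exact hd h
    have n2 : ¬ PySem.Chars.endswith (PySem.Chars.lower s) ['.','j','p','e','g'] = true := by
      rw [hjpeg]; rintro ⟨h, -⟩; exact hd h
    have n3 : ¬ PySem.Chars.endswith (PySem.Chars.lower s) ['.','p','n','g'] = true := by
      rw [hpng]; rintro ⟨h, -⟩; exact hd h
    have n4 : ¬ PySem.Chars.endswith (PySem.Chars.lower s) ['.','g','i','f'] = true := by
      rw [hgif]; rintro ⟨h, -⟩; exact hd h
    have n5 : ¬ PySem.Chars.endswith (PySem.Chars.lower s) ['.','w','e','b','p'] = true := by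
      rw [hwebp]; rintro ⟨h, -⟩; exact hd h
    simp [extLoopA, (by decide : (".jpg" : String).toList = ['.','j','p','g']),
      (by decide : (".jpeg" : String).toList = ['.','j','p','e','g']),
      (by decide : (".png" : String).toList = ['.','p','n','g']),
      (by decide : (".gif" : String).toList = ['.','g','i','f']),
      (by decide : (".webp" : String).toList = ['.','w','e','b','p']),
      n1, n2, n3, n4, n5, hd, pv_ct_eq]

-- ===== VERDICT (by name: the statement is the Claim_ definition above) =====
theorem get_image_extension_py_spec : Claim_equal_get_image_extension_py := by
  intro url content_type _
  unfold Spec_get_image_extension_py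
  exact pv_main url content_type
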